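-- pv_equiv track=rewrite | github.com/rekonas-com/rkns-python | rkns/_zarr/storehandler_zarr_v2.py | process_paths
-- ===== SOURCE A (Python) =====
-- def process_paths(paths_list):
--     """
--     Process a list of paths and return a list of tuples containing the path and basename.
--     Includes intermediate path components as separate entries.
--
--     Args:
--         paths_list (list): A list of strings representing paths
--
--     Returns:
--         list: A list of tuples, where each tuple contains (path, basename)
--               If a path doesn't have a directory component, path will be '/'
--               All path segments are included as separate entries
--
--     Example:
--         >>> process_paths(['_raw', 'history', 'rkns/signals', 'rkns/annotations'])
--         [('/', '_raw'), ('/', 'history'), ('/', 'rkns'), ('rkns', 'signals'), ('rkns', 'annotations')]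
--     """
--     result: list[tuple[str, str]] = []
--     seen_paths = set()
--
--     for path in paths_list:
--         parts = path.split("/")
--
--         # Process each part of the path
--         current_path = ""
--
--         for i, part in enumerate(parts):
--             if i == 0:
--                 # First part always has parent path '/'
--                 parent = "/"
--                 # Add the tuple if we haven't seen it before
--                 if (parent, part) not in seen_paths:
--                     result.append((parent, part))
--
--                     seen_paths.add((parent, part))
--                 current_path = part
--             else:
--                 # For subsequent parts, parent is the current_path
--                 parent = current_path
--                 # Add the tuple if we haven't seen it before
--                 if (parent, part) not in seen_paths:
--                     result.append((parent, part))
--                     seen_paths.add((parent, part))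
--                 # Update current_path for next iteration
--                 current_path = f"{current_path}/{part}"
--
--     for i, (path, name) in enumerate(result):
--         if path != "/":
--             result[i] = (f"/{path}/", name)
--
--     return result
-- ===== SOURCE B (Python) =====
-- def _fmt(p):
--     return p if p == "/" else f"/{p}/"
--
--
-- def process_paths(paths_list):
--     pairs = []
--     for path in paths_list:
--         parts = path.split("/")
--         pairs.append(("/", parts[0]))
--         for i in range(1, len(parts)):
--             p = "/".join(parts[:i])
--             pairs.append((_fmt(p), parts[i]))
--     return list(dict.fromkeys(pairs))
-- ===== Notes on version B (the rewrite author's own statement) =====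
-- stated objective: simpler
-- what changed: B emits each (parent, basename) pair already in its final form ('/' or '/parent/') in a single generation pass and deduplicates the whole stream once with dict.fromkeys, instead of A's interleaved seen-set bookkeeping followed by a second rewrite loop over the result.
import Mathlib
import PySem

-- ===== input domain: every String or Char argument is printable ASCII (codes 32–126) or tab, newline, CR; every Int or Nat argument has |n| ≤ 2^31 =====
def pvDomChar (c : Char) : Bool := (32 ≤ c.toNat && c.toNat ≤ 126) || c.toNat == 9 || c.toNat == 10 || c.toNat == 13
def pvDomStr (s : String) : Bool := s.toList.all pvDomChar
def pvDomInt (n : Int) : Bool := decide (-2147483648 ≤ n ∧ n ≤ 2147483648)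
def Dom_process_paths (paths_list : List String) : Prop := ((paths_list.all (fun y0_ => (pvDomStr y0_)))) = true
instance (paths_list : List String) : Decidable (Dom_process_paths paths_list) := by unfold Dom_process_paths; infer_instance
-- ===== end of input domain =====

-- B fuses A's generate-then-rewrite into one pass: it emits each (parent, basename) pair
-- already in final form and deduplicates the whole stream once (dict.fromkeys); same output.

-- ===== PORT A =====
-- the repeated Python block 'if (parent, part) not in seen_paths: result.append(…); seen_paths.add(…)'
def ppStep (rs : List (List Char × List Char) × PySem.Set (List Char × List Char))
    (pr : List Char × List Char) :
    List (List Char × List Char) × PySem.Set (List Char × List Char) :=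
  if PySem.Set.contains rs.2 pr then rs else (rs.1 ++ [pr], PySem.Set.add rs.2 pr)

-- body of 'for i, part in enumerate(parts)': state = ((result, seen_paths), current_path)
def ppInner (st : (List (List Char × List Char) × PySem.Set (List Char × List Char)) × List Char)
    (ip : Int × List Char) :
    (List (List Char × List Char) × PySem.Set (List Char × List Char)) × List Char :=
  if ip.1 == 0 then
    (ppStep st.1 (['/'], ip.2), ip.2)
  else
    (ppStep st.1 (st.2, ip.2), st.2 ++ '/' :: ip.2)

def process_paths (paths_list : List String) : List (String × String) :=
  let rs := paths_list.foldl
    (fun rs path =>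
      let parts := PySem.Chars.splitOn path.toList ['/']
      ((PySem.List.enumerate parts 0).foldl ppInner (rs, ([] : List Char))).1)
    (([], PySem.Set.empty))
  let result :=
    (PySem.List.enumerate rs.1 0).foldl
      (fun res ipn =>
        if ipn.2.1 ≠ ['/'] then
          PySem.List.pySetD res ipn.1 ('/' :: ipn.2.1 ++ ['/'], ipn.2.2)
        else res)
      rs.1
  result.map (fun pn => (String.ofList pn.1, String.ofList pn.2))

-- ===== PORT B =====
def ppFmt (p : List Char) : List Char := if p = ['/'] then p else '/' :: p ++ ['/']

def process_paths_alt (paths_list : List String) : List (String × String) :=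
  let pairs := paths_list.foldl
    (fun pairs path =>
      let parts := PySem.Chars.splitOn path.toList ['/']
      let pairs := pairs ++ [((['/'] : List Char), PySem.List.pyGetD parts 0 [])]
      (PySem.List.pyRange 1 parts.length).foldl
        (fun pairs i =>
          let p := PySem.Chars.join ['/'] (PySem.List.slice parts none (some i))
          pairs ++ [(ppFmt p, PySem.List.pyGetD parts i [])])
        pairs)
    []
  (PySem.List.dedup pairs).map (fun pn => (String.ofList pn.1, String.ofList pn.2))

-- ===== PRECONDITION & SPEC =====
def Spec_process_paths (paths_list : List String) (out : List (String × String)) : Prop := out = process_paths_alt paths_list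
instance (paths_list : List String) (out : List (String × String)) : Decidable (Spec_process_paths paths_list out) := by unfold Spec_process_paths; infer_instance

-- ===== CLAIM (what is proved, stated in full; the proofs are below) =====
def Claim_equal_process_paths : Prop := ∀ (paths_list : List String), Dom_process_paths paths_list → Spec_process_paths paths_list (process_paths paths_list)

-- ===== LEMMAS AND PROOFS =====

-- proof-side characterisations (used only below)
def ppRawT (cur : List Char) : List (List Char) → List (List Char × List Char)
  | [] => []
  | x :: t => (cur, x) :: ppRawT (cur ++ '/' :: x) t

def ppRaw : List (List Char) → List (List Char × List Char)
  | [] => []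
  | p0 :: rest => (['/'], p0) :: ppRawT p0 rest

def ppCur (cur : List Char) : List (List Char) → List Char
  | [] => cur
  | x :: t => ppCur (cur ++ '/' :: x) t

def ppF (pr : List Char × List Char) : List Char × List Char := (ppFmt pr.1, pr.2)

def ppStream (paths_list : List String) : List (List Char × List Char) :=
  paths_list.flatMap (fun path => ppRaw (PySem.Chars.splitOn path.toList ['/']))

lemma ppSplit_go_ne_nil (sep : List Char) (fuel : Nat) :
    ∀ (l cur : List Char) (acc : List (List Char)),
      PySem.Chars.splitOn.go sep fuel l cur acc ≠ [] := by
  induction fuel with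
  | zero => intro l cur acc; simp [PySem.Chars.splitOn.go]
  | succ n ih =>
    intro l cur acc
    cases l with
    | nil => simp [PySem.Chars.splitOn.go]
    | cons c rest =>
      rw [PySem.Chars.splitOn.go]
      split
      · exact ih _ _ _
      · exact ih _ _ _

lemma ppSplit_ne_nil (s : List Char) : PySem.Chars.splitOn s ['/'] ≠ [] := by
  exact ppSplit_go_ne_nil _ _ _ _ _

lemma ppInner_tail (rest : List (List Char)) :
    ∀ (k : Int), 1 ≤ k → ∀ rs (cur : List Char),
      (PySem.List.enumerate rest k).foldl ppInner (rs, cur) =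
        ((ppRawT cur rest).foldl ppStep rs, ppCur cur rest) := by
  induction rest with
  | nil => intro k hk rs cur; simp [PySem.List.enumerate_nil, ppRawT, ppCur]
  | cons x t ih =>
    intro k hk rs cur
    rw [PySem.List.enumerate_cons]
    have hk0 : (k == 0) = false := by simp; omega
    simp only [List.foldl_cons, ppInner, hk0, Bool.false_eq_true, if_false]
    rw [ih (k + 1) (by omega)]
    simp [ppRawT, ppCur]

lemma ppInner_full (parts : List (List Char)) (h : parts ≠ []) (rs) :
    ((PySem.List.enumerate parts 0).foldl ppInner (rs, ([] : List Char))).1 =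
      (ppRaw parts).foldl ppStep rs := by
  cases parts with
  | nil => exact absurd rfl h
  | cons p0 rest =>
    rw [PySem.List.enumerate_cons]
    simp only [List.foldl_cons, ppInner, beq_self_eq_true, if_true]
    norm_num
    rw [ppInner_tail rest 1 (by omega)]
    simp [ppRaw]

lemma ppStep_diag (l : List (List Char × List Char)) :
    ∀ s, l.foldl ppStep (s, s) = (PySem.Set.update s l, PySem.Set.update s l) := by
  induction l with
  | nil => intro s; simp [PySem.Set.update]
  | cons x t ih =>
    intro s
    have hstep : ppStep (s, s) x = (PySem.Set.add s x, PySem.Set.add s x) := by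
      unfold ppStep PySem.Set.add
      by_cases h : x ∈ s <;> simp [PySem.Set.contains, h]
    rw [List.foldl_cons, hstep, ih]
    simp [PySem.Set.update]

lemma ppCur_eq_join (l : List (List Char)) :
    ∀ cur, PySem.Chars.join ['/'] (cur :: l) = ppCur cur l := by
  induction l with
  | nil => intro cur; simp [PySem.Chars.join_singleton, ppCur]
  | cons x t ih =>
    intro cur
    rw [PySem.Chars.join_cons_cons, ppCur, ← ih]
    cases t with
    | nil => simp [PySem.Chars.join_singleton]
    | cons y t' => rw [PySem.Chars.join_cons_cons, PySem.Chars.join_cons_cons]; simp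

lemma ppRawT_eq_map (rest : List (List Char)) :
    ∀ cur, ppRawT cur rest =
      (List.range rest.length).map (fun j => (ppCur cur (rest.take j), rest.getD j [])) := by
  induction rest with
  | nil => intro cur; simp [ppRawT]
  | cons x t ih =>
    intro cur
    rw [ppRawT, ih]
    simp only [List.length_cons, List.range_succ_eq_map, List.map_cons, List.map_map]
    rw [List.cons_eq_cons]
    constructor
    · simp [ppCur]
    · apply List.map_congr_left
      intro j hj
      simp [Function.comp, List.take_succ_cons, ppCur]

lemma ppRange_one (n : Nat) :
    PySem.List.pyRange 1 ((n : Int) + 1) = (List.range n).map (fun j : Nat => (j : Int) + 1) := by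
  induction n with
  | zero => simp [PySem.List.pyRange]
  | succ m ih =>
    have hc : ((m + 1 : Nat) : Int) = (m : Int) + 1 := by push_cast; ring
    rw [hc, PySem.List.pyRange_one_succ_right (by omega), ih, List.range_succ]
    simp

lemma ppFmt_inj {p q : List Char} (h : ppFmt p = ppFmt q) : p = q := by
  unfold ppFmt at h
  split_ifs at h with h1 h2 h2
  · rw [h1, h2]
  · subst h1; apply_fun List.length at h; simp at h
  · subst h2; apply_fun List.length at h; simp at h
  · simpa using h

lemma ppF_inj {p q : List Char × List Char} (h : ppF p = ppF q) : p = q := by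
  unfold ppF at h
  obtain ⟨h1, h2⟩ := Prod.mk.injEq .. ▸ h
  exact Prod.ext (ppFmt_inj h1) h2

lemma ppDedup_aux (l : List (List Char × List Char)) :
    ∀ s, (l.map ppF).foldl PySem.Set.add (s.map ppF) = (l.foldl PySem.Set.add s).map ppF := by
  induction l with
  | nil => intro s; simp
  | cons x t ih =>
    intro s
    have hadd : PySem.Set.add (s.map ppF) (ppF x) = (PySem.Set.add s x).map ppF := by
      unfold PySem.Set.add
      by_cases h : x ∈ s
      · simp only [PySem.Set.contains, List.contains_iff_mem, h, decide_true, if_true]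
        have : ppF x ∈ s.map ppF := List.mem_map.mpr ⟨x, h, rfl⟩
        simp [this]
      · have : ppF x ∉ s.map ppF := by
          intro hm
          obtain ⟨y, hy, hyx⟩ := List.mem_map.mp hm
          exact h (ppF_inj hyx ▸ hy)
        simp [PySem.Set.contains, h, this]
    rw [List.map_cons, List.foldl_cons, List.foldl_cons, hadd, ih]

lemma ppDedup_map (l : List (List Char × List Char)) :
    PySem.List.dedup (l.map ppF) = (PySem.List.dedup l).map ppF := by
  rw [PySem.List.dedup_eq_ofList, PySem.List.dedup_eq_ofList,
    PySem.Set.ofList_eq_foldl, PySem.Set.ofList_eq_foldl]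
  have := ppDedup_aux l []
  simpa using this

lemma ppBodyB (pairs : List (List Char × List Char)) (path : String) :
    (let parts := PySem.Chars.splitOn path.toList ['/']
      let pairs := pairs ++ [((['/'] : List Char), PySem.List.pyGetD parts 0 [])]
      (PySem.List.pyRange 1 parts.length).foldl
        (fun pairs i =>
          let p := PySem.Chars.join ['/'] (PySem.List.slice parts none (some i))
          pairs ++ [(ppFmt p, PySem.List.pyGetD parts i [])])
        pairs) =
    pairs ++ (ppRaw (PySem.Chars.splitOn path.toList ['/'])).map ppF := by
  obtain ⟨p0, rest, hp⟩ : ∃ p0 rest, PySem.Chars.splitOn path.toList ['/'] = p0 :: rest := by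
    rcases hs : PySem.Chars.splitOn path.toList ['/'] with _ | ⟨p0, rest⟩
    · exact absurd hs (ppSplit_ne_nil _)
    · exact ⟨p0, rest, rfl⟩
  simp only [hp]
  rw [PySem.List.foldl_append_singleton_eq_map
    (f := fun i => (ppFmt (PySem.Chars.join ['/'] (PySem.List.slice (p0 :: rest) none (some i))),
      PySem.List.pyGetD (p0 :: rest) i []))]
  have hlen : ((p0 :: rest).length : Int) = (rest.length : Int) + 1 := by simp
  rw [hlen, ppRange_one, List.map_map]
  have hmap : (List.range rest.length).map
      ((fun i => (ppFmt (PySem.Chars.join ['/'] (PySem.List.slice (p0 :: rest) none (some i))),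
        PySem.List.pyGetD (p0 :: rest) i [])) ∘ (fun j : Nat => (j : Int) + 1)) =
      (ppRawT p0 rest).map ppF := by
    rw [ppRawT_eq_map, List.map_map]
    apply List.map_congr_left
    intro j hj
    have hj' : j < rest.length := List.mem_range.mp hj
    have hc : ((j : Int) + 1) = ((j + 1 : Nat) : Int) := by push_cast; ring
    simp only [Function.comp, hc, PySem.List.pyGetD_natCast,
      PySem.List.slice_to _ (b := ((j + 1 : Nat) : Int)) (by omega)]
    have htoNat : ((j + 1 : Nat) : Int).toNat = j + 1 := by omega
    rw [htoNat, List.take_succ_cons, ppCur_eq_join, List.getD_cons_succ, ppF]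
  rw [hmap]
  have h0 : PySem.List.pyGetD (p0 :: rest) 0 [] = p0 := by
    have := PySem.List.pyGetD_natCast (p0 :: rest) 0 ([] : List Char)
    simpa using this
  have hF0 : ppF (['/'], p0) = ((['/'] : List Char), p0) := by
    simp [ppF, ppFmt]
  rw [h0, ppRaw, List.map_cons, hF0]
  simp

lemma ppPhase2 (l : List (List Char × List Char)) :
    ∀ (acc : List (List Char × List Char)),
      (PySem.List.enumerate l (acc.length : Int)).foldl
        (fun res ipn =>
          if ipn.2.1 ≠ ['/'] then
            PySem.List.pySetD res ipn.1 ('/' :: ipn.2.1 ++ ['/'], ipn.2.2)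
          else res)
        (acc ++ l) = acc ++ l.map ppF := by
  induction l with
  | nil => intro acc; simp [PySem.List.enumerate_nil]
  | cons pn t ih =>
    intro acc
    rw [PySem.List.enumerate_cons, List.foldl_cons]
    have hlen : (acc.length : Int) + 1 = ((acc ++ [ppF pn]).length : Int) := by
      simp
    by_cases h : pn.1 = ['/']
    · have hF : ppF pn = pn := by
        obtain ⟨a, b⟩ := pn
        simp_all [ppF, ppFmt]
      simp only [h, ne_eq, not_true_eq_false, if_neg, ite_false]
      have : acc ++ pn :: t = (acc ++ [ppF pn]) ++ t := by simp [hF]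
      rw [this, hlen, ih (acc ++ [ppF pn])]
      simp
    · have hset : PySem.List.pySetD (acc ++ pn :: t) ((acc.length : Int))
          ('/' :: pn.1 ++ ['/'], pn.2) = (acc ++ [ppF pn]) ++ t := by
        have := PySem.List.pySetD_natCast (acc ++ pn :: t) acc.length ('/' :: pn.1 ++ ['/'], pn.2)
        rw [this]
        simp [ppF, ppFmt, h]
      simp only [h, ne_eq, not_false_eq_true, if_pos, ite_true]
      rw [hset, hlen, ih (acc ++ [ppF pn])]
      simp

lemma ppA_eq (paths_list : List String) :
    process_paths paths_list =
      ((PySem.List.dedup (ppStream paths_list)).map ppF).map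
        (fun pn => (String.ofList pn.1, String.ofList pn.2)) := by
  unfold process_paths
  have hb : (fun rs (path : String) =>
      let parts := PySem.Chars.splitOn path.toList ['/']
      ((PySem.List.enumerate parts 0).foldl ppInner (rs, ([] : List Char))).1) =
      (fun rs path => (ppRaw (PySem.Chars.splitOn path.toList ['/'])).foldl ppStep rs) := by
    funext rs path
    exact ppInner_full _ (ppSplit_ne_nil _) rs
  rw [hb]
  rw [show (([], PySem.Set.empty) :
      List (List Char × List Char) × PySem.Set (List Char × List Char)) =
      (([] : List (List Char × List Char)), ([] : List (List Char × List Char))) from rfl]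
  rw [← List.foldl_flatMap, ppStep_diag]
  have hup : PySem.Set.update ([] : List (List Char × List Char)) (ppStream paths_list) =
      PySem.List.dedup (ppStream paths_list) := by
    rw [PySem.List.dedup_eq_ofList, PySem.Set.update_nil_left]
  simp only [ppStream] at hup
  simp only [hup]
  have := ppPhase2 (PySem.List.dedup (ppStream paths_list)) []
  simp only [List.length_nil, Nat.cast_zero, List.nil_append, ppStream] at this
  rw [this]
  simp [ppStream]

lemma ppB_eq (paths_list : List String) :
    process_paths_alt paths_list =
      ((PySem.List.dedup (ppStream paths_list)).map ppF).map
        (fun pn => (String.ofList pn.1, String.ofList pn.2)) := by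
  unfold process_paths_alt
  have hb : (fun pairs (path : String) =>
      let parts := PySem.Chars.splitOn path.toList ['/']
      let pairs := pairs ++ [((['/'] : List Char), PySem.List.pyGetD parts 0 [])]
      (PySem.List.pyRange 1 parts.length).foldl
        (fun pairs i =>
          let p := PySem.Chars.join ['/'] (PySem.List.slice parts none (some i))
          pairs ++ [(ppFmt p, PySem.List.pyGetD parts i [])])
        pairs) =
      (fun pairs path => pairs ++ (ppRaw (PySem.Chars.splitOn path.toList ['/'])).map ppF) := by
    funext pairs path
    exact ppBodyB pairs path
  rw [hb]
  rw [PySem.List.foldl_append_eq_flatMap]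
  have : paths_list.flatMap (fun path => (ppRaw (PySem.Chars.splitOn path.toList ['/'])).map ppF) =
      (ppStream paths_list).map ppF := by
    rw [ppStream, List.map_flatMap]
  rw [List.nil_append, this]
  show List.map (fun pn => (String.ofList pn.1, String.ofList pn.2))
      (PySem.List.dedup (List.map ppF (ppStream paths_list))) =
    ((PySem.List.dedup (ppStream paths_list)).map ppF).map
      (fun pn => (String.ofList pn.1, String.ofList pn.2))
  rw [ppDedup_map]

-- ===== VERDICT (by name: the statement is the Claim_ definition above) =====
theorem process_paths_spec : Claim_equal_process_paths := by
  intro paths_list _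
  show process_paths paths_list = process_paths_alt paths_list
  rw [ppA_eq, ppB_eq]
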